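-- pv_equiv track=rewrite | github.com/dyoburon/aso-keyword-tool | aso.py | classify_title_match
-- ===== SOURCE A (Python) =====
-- def classify_title_match(keyword: str, title: str) -> str:
--     """Classify how well an app title matches a keyword.
--
--     Returns: "exact", "broad", "partial", or "none"
--     """
--     kw = keyword.lower().strip()
--     t = title.lower()
--
--     # Exact: keyword appears as contiguous substring
--     if kw in t:
--         return "exact"
--
--     # For multi-word keywords, check word-level matching
--     kw_words = kw.split()
--     if len(kw_words) > 1:
--         t_words = t.split()
--         # Broad: all keyword words present in title (any order)
--         if all(any(kw_w in tw for tw in t_words) for kw_w in kw_words):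
--             return "broad"
--         # Partial: some keyword words present
--         if any(any(kw_w in tw for tw in t_words) for kw_w in kw_words):
--             return "partial"
--
--     return "none"
-- ===== SOURCE B (Python) =====
-- def classify_title_match(keyword: str, title: str) -> str:
--     """Classify how well an app title matches a keyword.
--
--     Returns: "exact", "broad", "partial", or "none"
--     """
--     kw = keyword.lower().strip()
--     t = title.lower()
--
--     if kw in t:
--         return "exact"
--
--     kw_words = kw.split()
--     if len(kw_words) <= 1:
--         return "none"
--
--     # Inverted traversal: walk the TITLE words once, shrinking the set of
--     # still-unmatched keyword words; stop early once it empties.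
--     remaining = set(kw_words)
--     hit = False
--     for tw in t.split():
--         found = {w for w in remaining if w in tw}
--         if found:
--             hit = True
--             remaining -= found
--             if not remaining:
--                 return "broad"
--     return "partial" if hit else "none"
-- ===== Notes on version B (the rewrite author's own statement) =====
-- stated objective: alternative
-- what changed: Inverts the nested scan: instead of testing each keyword word against all title words with all()/any(), B walks the title words once, maintaining a shrinking set of still-unmatched keyword words, returning 'broad' early when it empties and deciding partial/none from a hit flag.
import Mathlib
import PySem

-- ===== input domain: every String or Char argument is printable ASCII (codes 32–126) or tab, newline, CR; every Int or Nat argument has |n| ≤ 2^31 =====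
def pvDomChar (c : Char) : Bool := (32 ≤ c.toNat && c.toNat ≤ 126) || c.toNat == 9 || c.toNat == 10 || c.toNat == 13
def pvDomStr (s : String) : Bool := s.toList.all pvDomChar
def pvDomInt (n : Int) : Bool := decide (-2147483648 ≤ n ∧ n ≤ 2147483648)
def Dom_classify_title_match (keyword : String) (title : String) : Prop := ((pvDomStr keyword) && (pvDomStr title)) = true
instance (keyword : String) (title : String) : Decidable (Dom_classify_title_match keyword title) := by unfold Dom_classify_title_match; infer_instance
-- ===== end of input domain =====

-- B inverts the traversal: one pass over title words shrinking a set of unmatched keyword words (alternative decomposition, same cost).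


-- ===== PORT A =====
def classify_title_match (keyword : String) (title : String) : String :=
  let kw := PySem.Str.strip (PySem.Str.lower keyword)
  let t := PySem.Str.lower title
  if PySem.Str.isIn kw t then "exact"
  else
    let kw_words := PySem.Str.split₀ kw
    if kw_words.length > 1 then
      let t_words := PySem.Str.split₀ t
      if kw_words.all (fun kw_w => t_words.any (fun tw => PySem.Str.isIn kw_w tw)) then "broad"
      else if kw_words.any (fun kw_w => t_words.any (fun tw => PySem.Str.isIn kw_w tw)) then "partial"
      else "none"
    else "none"

-- ===== PORT B =====
-- the 'for tw in t.split()' loop of Source B, with its early 'return "broad"'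
def pvLoopB (tws : List String) (remaining : PySem.Set String) (hit : Bool) : String :=
  match tws with
  | [] => if hit then "partial" else "none"
  | tw :: rest =>
      let found : PySem.Set String := remaining.filter (fun w => PySem.Str.isIn w tw)
      if found = [] then pvLoopB rest remaining hit
      else
        let remaining' := PySem.Set.diff remaining found
        if remaining' = [] then "broad"
        else pvLoopB rest remaining' true

def classify_title_match_alt (keyword : String) (title : String) : String :=
  let kw := PySem.Str.strip (PySem.Str.lower keyword)
  let t := PySem.Str.lower title
  if PySem.Str.isIn kw t then "exact"
  else
    let kw_words := PySem.Str.split₀ kw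
    if kw_words.length ≤ 1 then "none"
    else
      let remaining := PySem.Set.ofList kw_words
      pvLoopB (PySem.Str.split₀ t) remaining false

-- ===== PRECONDITION & SPEC =====
def Spec_classify_title_match (keyword : String) (title : String) (out : String) : Prop := out = classify_title_match_alt keyword title
instance (keyword : String) (title : String) (out : String) : Decidable (Spec_classify_title_match keyword title out) := by unfold Spec_classify_title_match; infer_instance

-- ===== CLAIM (what is proved, stated in full; the proofs are below) =====
def Claim_equal_classify_title_match : Prop := ∀ (keyword : String) (title : String), Dom_classify_title_match keyword title → Spec_classify_title_match keyword title (classify_title_match keyword title)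

-- ===== LEMMAS AND PROOFS =====

theorem pv_bool_eq_of_iff {a b : Bool} (h : a = true ↔ b = true) : a = b := by
  cases a <;> cases b <;> simp_all

theorem pv_all_congr {α : Type} (l : List α) (f g : α → Bool) (h : ∀ x ∈ l, f x = g x) :
    l.all f = l.all g := by
  induction l with
  | nil => rfl
  | cons a t ih =>
      rw [List.all_cons, List.all_cons, h a (by simp),
          ih (fun x hx => h x (by simp [hx]))]

theorem pv_any_congr {α : Type} (l : List α) (f g : α → Bool) (h : ∀ x ∈ l, f x = g x) :
    l.any f = l.any g := by
  induction l with
  | nil => rfl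
  | cons a t ih =>
      rw [List.any_cons, List.any_cons, h a (by simp),
          ih (fun x hx => h x (by simp [hx]))]

-- characterisation of pvLoopB for a nonempty 'remaining': it computes A's all/any chain
theorem pvLoopB_eq (tws : List String) :
    ∀ (remaining : PySem.Set String) (hit : Bool), remaining ≠ [] →
    pvLoopB tws remaining hit =
      (if remaining.all (fun w => tws.any (fun tw => PySem.Str.isIn w tw)) then "broad"
       else if hit || remaining.any (fun w => tws.any (fun tw => PySem.Str.isIn w tw)) then "partial"
       else "none") := by
  induction tws with
  | nil =>
      intro remaining hit hne
      cases remaining with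
      | nil => exact absurd rfl hne
      | cons a l => simp [pvLoopB]
  | cons tw rest ih =>
      intro remaining hit hne
      simp only [pvLoopB]
      by_cases hfound : remaining.filter (fun w => PySem.Str.isIn w tw) = ([] : List String)
      · -- no keyword word matches tw: tw is irrelevant on both sides
        rw [if_pos hfound, ih remaining hit hne]
        have hno : ∀ w ∈ remaining, PySem.Str.isIn w tw = false := by
          intro w hw
          have := List.filter_eq_nil_iff.1 hfound w hw
          exact Bool.eq_false_iff.2 this
        have hall := pv_all_congr remaining
            (fun w => rest.any (fun t' => PySem.Str.isIn w t'))
            (fun w => (tw :: rest).any (fun t' => PySem.Str.isIn w t'))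
            (fun w hw => by simp only [List.any_cons, hno w hw, Bool.false_or])
        have hany := pv_any_congr remaining
            (fun w => rest.any (fun t' => PySem.Str.isIn w t'))
            (fun w => (tw :: rest).any (fun t' => PySem.Str.isIn w t'))
            (fun w hw => by simp only [List.any_cons, hno w hw, Bool.false_or])
        rw [hall, hany]
      · rw [if_neg hfound]
        obtain ⟨w0, hw0f⟩ := List.exists_mem_of_ne_nil _ hfound
        obtain ⟨hw0, hp0⟩ := List.mem_filter.1 hw0f
        have hsome : remaining.any (fun w => (tw :: rest).any (fun t' => PySem.Str.isIn w t')) = true :=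
          List.any_eq_true.2 ⟨w0, hw0, by rw [List.any_cons, hp0, Bool.true_or]⟩
        have hmemd : ∀ w, w ∈ PySem.Set.diff remaining (remaining.filter (fun w => PySem.Str.isIn w tw)) ↔
            (w ∈ remaining ∧ PySem.Str.isIn w tw = false) := by
          intro w
          rw [PySem.Set.mem_diff]
          constructor
          · rintro ⟨h1, h2⟩
            refine ⟨h1, ?_⟩
            cases hb : PySem.Str.isIn w tw with
            | false => rfl
            | true => exact absurd (List.mem_filter.2 ⟨h1, hb⟩) h2
          · rintro ⟨h1, h2⟩
            refine ⟨h1, fun hm => ?_⟩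
            have := (List.mem_filter.1 hm).2
            rw [h2] at this
            exact Bool.false_ne_true this
        by_cases hrem : PySem.Set.diff remaining (remaining.filter (fun w => PySem.Str.isIn w tw)) = ([] : List String)
        · -- every remaining word matches tw ⇒ "broad" on both sides
          rw [if_pos hrem]
          have hall : remaining.all (fun w => (tw :: rest).any (fun t' => PySem.Str.isIn w t')) = true := by
            refine List.all_eq_true.2 (fun w hw => ?_)
            have hin : PySem.Str.isIn w tw = true := by
              cases hb : PySem.Str.isIn w tw with
              | true => rfl
              | false =>
                  have : w ∈ PySem.Set.diff remaining (remaining.filter (fun w => PySem.Str.isIn w tw)) :=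
                    (hmemd w).2 ⟨hw, hb⟩
                  rw [hrem] at this
                  exact absurd this (List.not_mem_nil)
            rw [List.any_cons, hin, Bool.true_or]
          rw [if_pos hall]
        · rw [if_neg hrem, ih _ true hrem]
          have hall : remaining.all (fun w => (tw :: rest).any (fun t' => PySem.Str.isIn w t'))
              = (PySem.Set.diff remaining (remaining.filter (fun w => PySem.Str.isIn w tw))).all
                  (fun w => rest.any (fun t' => PySem.Str.isIn w t')) := by
            apply pv_bool_eq_of_iff
            constructor
            · intro h1
              refine List.all_eq_true.2 (fun w hw => ?_)
              obtain ⟨hwr, hwf⟩ := (hmemd w).1 hw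
              have := List.all_eq_true.1 h1 w hwr
              rwa [List.any_cons, hwf, Bool.false_or] at this
            · intro h2
              refine List.all_eq_true.2 (fun w hw => ?_)
              cases hb : PySem.Str.isIn w tw with
              | true => rw [List.any_cons, hb, Bool.true_or]
              | false =>
                  have hwd := (hmemd w).2 ⟨hw, hb⟩
                  have := List.all_eq_true.1 h2 w hwd
                  rw [List.any_cons, hb, Bool.false_or]
                  exact this
          rw [← hall, hsome]
          simp only [Bool.true_or, Bool.or_true]

-- all/any over Set.ofList equal all/any over the underlying list
theorem pv_all_ofList (l : List String) (p : String → Bool) :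
    (PySem.Set.ofList l).all p = l.all p := by
  apply pv_bool_eq_of_iff
  rw [List.all_eq_true, List.all_eq_true]
  exact ⟨fun h w hw => h w ((PySem.Set.mem_ofList l w).2 hw),
         fun h w hw => h w ((PySem.Set.mem_ofList l w).1 hw)⟩

theorem pv_any_ofList (l : List String) (p : String → Bool) :
    (PySem.Set.ofList l).any p = l.any p := by
  apply pv_bool_eq_of_iff
  rw [List.any_eq_true, List.any_eq_true]
  exact ⟨fun ⟨w, hw, hp⟩ => ⟨w, (PySem.Set.mem_ofList l w).1 hw, hp⟩,
         fun ⟨w, hw, hp⟩ => ⟨w, (PySem.Set.mem_ofList l w).2 hw, hp⟩⟩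

-- ===== VERDICT (by name: the statement is the Claim_ definition above) =====
theorem classify_title_match_spec : Claim_equal_classify_title_match := by
  intro keyword title _
  unfold Spec_classify_title_match classify_title_match classify_title_match_alt
  simp only
  split
  · rfl
  · set kws := PySem.Str.split₀ (PySem.Str.strip (PySem.Str.lower keyword)) with hkws
    set tws := PySem.Str.split₀ (PySem.Str.lower title) with htws
    by_cases hlen : kws.length > 1
    · have hle : ¬ (kws.length ≤ 1) := by omega
      rw [if_pos hlen, if_neg hle]
      have hk : kws ≠ [] := by
        intro h
        rw [h] at hlen
        simp at hlen
      obtain ⟨a, ha⟩ := List.exists_mem_of_ne_nil kws hk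
      have hne : PySem.Set.ofList kws ≠ [] := by
        intro h
        have := (PySem.Set.mem_ofList kws a).2 ha
        rw [h] at this
        exact absurd this (List.not_mem_nil)
      rw [pvLoopB_eq tws _ false hne, pv_all_ofList, pv_any_ofList, Bool.false_or]
    · have hle : kws.length ≤ 1 := by omega
      rw [if_neg hlen, if_pos hle]
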